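-- pv_equiv track=rewrite | github.com/freiheit/MvKDiceBot | mvkroller.py | crit_fumble
-- ===== SOURCE A (Python) =====
-- def crit_fumble(fortunedicerolls, characterdicerolls):
--     """Check if we had a critical fumble. If so, add output and discard lowest non-1 die"""
--     answer = ""
--     newdicerolls = characterdicerolls
--     if fortunedicerolls[0] == 1:
--         answer += "**Critical Fumble**\n"
--         characterdicerolls.sort()
--         newdicerolls = []
--         scratched = False
--         for i in characterdicerolls:
--             if scratched:
--                 newdicerolls.append(i)
--             elif i == 1:
--                 newdicerolls.append(i)
--             else:
--                 scratched = True
--                 answer += f"*Scratched {i}*\n"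
--                 # no append because scratching this die
--
--         answer += "**Gain 1 inspiration point**\n"
--         answer += f"New character dice: {newdicerolls}\n"
--     return answer, newdicerolls
-- ===== SOURCE B (Python) =====
-- def crit_fumble(fortunedicerolls, characterdicerolls):
--     """Check if we had a critical fumble. If so, add output and discard lowest non-1 die"""
--     if fortunedicerolls[0] != 1:
--         return "", characterdicerolls
--     characterdicerolls.sort()
--     c = 0
--     while c < len(characterdicerolls) and characterdicerolls[c] == 1:
--         c += 1
--     if c < len(characterdicerolls):
--         scratch = f"*Scratched {characterdicerolls[c]}*\n"
--         newdicerolls = characterdicerolls[:c] + characterdicerolls[c + 1:]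
--     else:
--         scratch = ""
--         newdicerolls = characterdicerolls[:]
--     answer = (
--         "**Critical Fumble**\n"
--         + scratch
--         + "**Gain 1 inspiration point**\n"
--         + f"New character dice: {newdicerolls}\n"
--     )
--     return answer, newdicerolls
-- ===== Notes on version B (the rewrite author's own statement) =====
-- stated objective: simpler
-- what changed: Replaces the boolean-flag accumulator loop (append-or-scratch while building the new list element by element) with a direct split-point computation: scan for the first non-1 index in the sorted list, slice it out, and assemble the answer string in one expression.
import Mathlib
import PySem

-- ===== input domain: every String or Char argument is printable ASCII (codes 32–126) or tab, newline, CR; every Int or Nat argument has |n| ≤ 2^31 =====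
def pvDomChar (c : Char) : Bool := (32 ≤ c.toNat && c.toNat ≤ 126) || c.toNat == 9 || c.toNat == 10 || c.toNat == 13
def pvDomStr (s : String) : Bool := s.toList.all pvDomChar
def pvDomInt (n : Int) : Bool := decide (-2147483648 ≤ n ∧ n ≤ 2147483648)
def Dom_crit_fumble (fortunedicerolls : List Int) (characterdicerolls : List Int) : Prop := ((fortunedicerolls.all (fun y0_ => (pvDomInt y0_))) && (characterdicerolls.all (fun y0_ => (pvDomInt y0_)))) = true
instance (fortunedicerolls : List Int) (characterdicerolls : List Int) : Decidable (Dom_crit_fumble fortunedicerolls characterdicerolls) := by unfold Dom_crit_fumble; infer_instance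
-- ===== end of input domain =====

-- B replaces A's boolean-flag accumulator loop by a split-index-and-slice decomposition (same cost, simpler);
-- both A and B sort `characterdicerolls` in place on the fumble branch — the equivalence proved here is about the return value.

-- ===== PORT A =====

-- str([a, b, c]) — Python's repr of a list of ints (shared formatting helper for both ports)
def pyListRepr (l : List Int) : String :=
  "[" ++ String.intercalate ", " (l.map PySem.Int.toStr) ++ "]"

-- A's `for i in characterdicerolls` loop carrying (scratched, newdicerolls, answer)
def critLoopA : List Int → Bool → List Int → String → List Int × String
  | [], _, nd, ans => (nd, ans)
  | i :: rest, scratched, nd, ans =>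
    if scratched then critLoopA rest scratched (nd ++ [i]) ans
    else if i == 1 then critLoopA rest scratched (nd ++ [i]) ans
    else critLoopA rest true nd (ans ++ ("*Scratched " ++ PySem.Int.toStr i ++ "*\n"))

def crit_fumble (fortunedicerolls : List Int) (characterdicerolls : List Int) : String × List Int :=
  if PySem.List.pyGet? fortunedicerolls 0 = some 1 then
    let sorted := PySem.List.sorted characterdicerolls (fun x => x) false
    let (newdicerolls, answer) := critLoopA sorted false [] ("" ++ "**Critical Fumble**\n")
    let answer := answer ++ "**Gain 1 inspiration point**\n"
    let answer := answer ++ ("New character dice: " ++ pyListRepr newdicerolls ++ "\n")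
    (answer, newdicerolls)
  else ("", characterdicerolls)

-- ===== PORT B =====
def crit_fumble_alt (fortunedicerolls : List Int) (characterdicerolls : List Int) : String × List Int :=
  if ¬ (PySem.List.pyGet? fortunedicerolls 0 = some 1) then ("", characterdicerolls)
  else
    let s := PySem.List.sorted characterdicerolls (fun x => x) false
    -- the while loop: c = index of the first non-1 entry (= length of s if none)
    let c := (s.takeWhile (fun i => i == 1)).length
    let (scratch, newdicerolls) :=
      match s.drop c with        -- s[c] exists iff c < len(s)
      | i :: _ => ("*Scratched " ++ PySem.Int.toStr i ++ "*\n", s.take c ++ s.drop (c + 1))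
      | [] => ("", s)
    ("**Critical Fumble**\n" ++ scratch ++ "**Gain 1 inspiration point**\n"
       ++ ("New character dice: " ++ pyListRepr newdicerolls ++ "\n"),
     newdicerolls)

-- ===== PRECONDITION & SPEC =====
-- Pre_ excludes only the inputs on which A raises IndexError: empty fortunedicerolls.
def Pre_crit_fumble (fortunedicerolls : List Int) (characterdicerolls : List Int) : Prop :=
  fortunedicerolls ≠ []
instance (fortunedicerolls : List Int) (characterdicerolls : List Int) : Decidable (Pre_crit_fumble fortunedicerolls characterdicerolls) := by unfold Pre_crit_fumble; infer_instance
def pvWitness_crit_fumble : List Int × List Int := ([1, 4], [1, 1, 3, 5])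

def Spec_crit_fumble (fortunedicerolls : List Int) (characterdicerolls : List Int) (out : String × List Int) : Prop := out = crit_fumble_alt fortunedicerolls characterdicerolls
instance (fortunedicerolls : List Int) (characterdicerolls : List Int) (out : String × List Int) : Decidable (Spec_crit_fumble fortunedicerolls characterdicerolls out) := by unfold Spec_crit_fumble; infer_instance

-- ===== CLAIM (what is proved, stated in full; the proofs are below) =====
def Claim_equal_crit_fumble : Prop := ∀ (fortunedicerolls : List Int) (characterdicerolls : List Int), Dom_crit_fumble fortunedicerolls characterdicerolls → Pre_crit_fumble fortunedicerolls characterdicerolls → Spec_crit_fumble fortunedicerolls characterdicerolls (crit_fumble fortunedicerolls characterdicerolls)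

-- ===== LEMMAS AND PROOFS =====

-- once scratched, the loop just appends the rest
lemma critLoopA_true (s : List Int) (nd : List Int) (ans : String) :
    critLoopA s true nd ans = (nd ++ s, ans) := by
  induction s generalizing nd with
  | nil => simp [critLoopA]
  | cons a t ih => simp [critLoopA, ih]

-- the unscratched loop = split at the first non-1 element
lemma critLoopA_split (s : List Int) (nd : List Int) (ans : String) :
    critLoopA s false nd ans =
      match s.dropWhile (fun i => i == 1) with
      | [] => (nd ++ s, ans)
      | i :: rest =>
          (nd ++ s.takeWhile (fun i => i == 1) ++ rest,
           ans ++ ("*Scratched " ++ PySem.Int.toStr i ++ "*\n")) := by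
  induction s generalizing nd ans with
  | nil => simp [critLoopA]
  | cons a t ih =>
    by_cases ha : a = (1 : Int)
    · subst ha
      simp only [critLoopA, List.dropWhile, List.takeWhile]
      rw [ih]
      cases t.dropWhile (fun i => i == 1) <;> simp
    · have hb : (a == (1 : Int)) = false := by simpa using ha
      simp only [critLoopA, hb, if_false, Bool.false_eq_true, critLoopA_true,
        List.dropWhile, List.takeWhile]
      simp

lemma takeWhile_length_take (s : List Int) :
    s.take ((s.takeWhile (fun i => i == 1)).length) = s.takeWhile (fun i => i == 1) :=
  ((List.prefix_iff_eq_take).1 (List.takeWhile_prefix _)).symm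

lemma dropWhile_eq_drop_len (s : List Int) :
    s.drop ((s.takeWhile (fun i => i == 1)).length) = s.dropWhile (fun i => i == 1) := by
  nth_rewrite 2 [← List.takeWhile_append_dropWhile (p := fun i => (i == 1)) (l := s)]
  exact List.drop_left ..

lemma drop_succ_len (s : List Int) (i : Int) (rest : List Int)
    (h : s.dropWhile (fun i => i == 1) = i :: rest) :
    s.drop ((s.takeWhile (fun i => i == 1)).length + 1) = rest := by
  nth_rewrite 2 [← List.takeWhile_append_dropWhile (p := fun i => (i == 1)) (l := s)]
  rw [h, List.drop_append]
  simp

-- ===== VERDICT (by name: the statement is the Claim_ definition above) =====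
theorem crit_fumble_spec : Claim_equal_crit_fumble := by
  intro f c _ _
  unfold Spec_crit_fumble crit_fumble crit_fumble_alt
  by_cases h : PySem.List.pyGet? f 0 = some 1
  · rw [if_pos h, if_neg (show ¬¬(PySem.List.pyGet? f 0 = some 1) by simp [h])]
    dsimp only
    set s := PySem.List.sorted c (fun x => x) false with hs
    rw [critLoopA_split]
    rcases hd : s.dropWhile (fun i => i == 1) with _ | ⟨i, rest⟩
    · simp [hd, dropWhile_eq_drop_len, String.append_assoc]
    · have h1 : s.drop ((s.takeWhile (fun i => i == 1)).length) = i :: rest := by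
        rw [dropWhile_eq_drop_len, hd]
      simp only [h1, takeWhile_length_take, drop_succ_len s i rest hd]
      simp [String.append_assoc]
  · simp [h]
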